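-- pv_equiv track=rewrite | github.com/pytorch/PiPPy | spmd/tensor/ops/tags/shape_ops.py | mapped_broadcast_shapes
-- ===== SOURCE A (Python) =====
-- pymax = max
--
-- pyrange = range
--
-- def mapped_broadcast_shapes(shapes):
--     # get the largest dim
--     max_dim_len = pymax(len(s) for s in shapes)
--     # add singleton left padding
--     padded_shapes = [
--         (1, ) * pymax(0, max_dim_len - len(shape)) + tuple(shape)
--         for shape in shapes
--     ]
--     expanded_shape = [1, ] * max_dim_len
--     for i in pyrange(max_dim_len):
--         for padded_shape in padded_shapes:
--             assert 1 in (expanded_shape[i], padded_shape[i]) or expanded_shape[i] == padded_shape[i], f'{expanded_shape[i]} vs {padded_shape[i]}'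
--             if padded_shape[i] > expanded_shape[i]:
--                 expanded_shape[i] = padded_shape[i]
--     return tuple(expanded_shape)
-- ===== SOURCE B (Python) =====
-- from functools import reduce
--
-- def mapped_broadcast_shapes(shapes):
--     # get the largest dim (ValueError on empty input, as before)
--     max_dim_len = max(len(s) for s in shapes)
--
--     def step(out, shape):
--         out = list(out)
--         # align shape to the right of the accumulator and broadcast in place
--         for j, v in enumerate(reversed(shape), 1):
--             a = out[-j]
--             assert a == v or 1 in (a, v), f'{a} vs {v}'
--             if v > a:
--                 out[-j] = v
--         return tuple(out)
--
--     return reduce(step, shapes, (1,) * max_dim_len)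
-- ===== Notes on version B (the rewrite author's own statement) =====
-- stated objective: alternative
-- what changed: Replaces the padded-matrix build plus column-by-column double loop with a functools.reduce fold over the shapes: each step right-aligns the next shape against the running result via reversed/negative indexing and keeps the broadcast dim, so no padded copies of the shapes are ever built.
import Mathlib
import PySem

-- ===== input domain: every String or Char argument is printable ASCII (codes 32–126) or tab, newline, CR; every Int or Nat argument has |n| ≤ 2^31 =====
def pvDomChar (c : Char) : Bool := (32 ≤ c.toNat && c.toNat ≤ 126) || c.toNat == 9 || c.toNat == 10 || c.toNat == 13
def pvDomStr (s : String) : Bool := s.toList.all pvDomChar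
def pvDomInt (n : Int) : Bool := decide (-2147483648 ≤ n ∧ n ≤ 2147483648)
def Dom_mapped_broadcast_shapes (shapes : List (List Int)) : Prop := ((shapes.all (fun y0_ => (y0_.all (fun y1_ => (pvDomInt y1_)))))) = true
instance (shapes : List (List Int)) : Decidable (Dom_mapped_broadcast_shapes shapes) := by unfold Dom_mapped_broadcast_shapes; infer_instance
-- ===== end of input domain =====

-- B replaces A's padded-matrix build plus column-by-column double loop by a single
-- reduce-style fold over the shapes, right-aligning each shape against the running
-- result (alternative decomposition, same cost class).

-- ===== PORT A =====
def mapped_broadcast_shapes (shapes : List (List Int)) : List Int :=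
  let max_dim_len : Int :=
    (PySem.List.max? (shapes.map (fun s => (s.length : Int))) (fun x => x)).getD 0
  let padded_shapes : List (List Int) := shapes.map (fun shape =>
    List.replicate (max 0 (max_dim_len - (shape.length : Int))).toNat 1 ++ shape)
  let expanded0 : List Int := List.replicate max_dim_len.toNat 1
  (PySem.List.pyRange 0 max_dim_len 1).foldl (fun expanded i =>
    padded_shapes.foldl (fun e padded =>
      -- the Python 'assert' never fires on inputs admitted by Pre_; it computes no value
      if PySem.List.pyGetD padded i 0 > PySem.List.pyGetD e i 0 then
        PySem.List.pySetD e i (PySem.List.pyGetD padded i 0)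
      else e) expanded) expanded0

-- ===== PORT B =====
def mapped_broadcast_shapes_alt (shapes : List (List Int)) : List Int :=
  let max_dim_len : Int :=
    (PySem.List.max? (shapes.map (fun s => (s.length : Int))) (fun x => x)).getD 0
  shapes.foldl (fun out shape =>
    -- for j, v in enumerate(reversed(shape), 1): out[-j] = max(out[-j], v)
    (shape.reverse.zipIdx 1).foldl (fun out vj =>
      let a := PySem.List.pyGetD out (-(vj.2 : Int)) 0
      if vj.1 > a then PySem.List.pySetD out (-(vj.2 : Int)) vj.1 else out) out)
    (List.replicate max_dim_len.toNat 1)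

-- ===== PRECONDITION & SPEC =====
-- aligned-dimension compatibility of two shapes (right-aligned columns)
def pvCompat (s t : List Int) : Bool :=
  (List.range (min s.length t.length)).all (fun j =>
    decide (1 < s.getD (s.length - 1 - j) 0 →
      t.getD (t.length - 1 - j) 0 = 1 ∨ t.getD (t.length - 1 - j) 0 = s.getD (s.length - 1 - j) 0))

-- Pre_ excludes exactly the inputs on which the Python A raises: the empty list
-- (ValueError from max) and shape lists with a broadcast-incompatible aligned pair
-- of dimensions (AssertionError).
def Pre_mapped_broadcast_shapes (shapes : List (List Int)) : Prop :=
  shapes ≠ [] ∧ List.Pairwise (fun s t => pvCompat s t = true) shapes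
instance (shapes : List (List Int)) : Decidable (Pre_mapped_broadcast_shapes shapes) := by
  unfold Pre_mapped_broadcast_shapes; infer_instance

def pvWitness_mapped_broadcast_shapes : List (List Int) := [[2, 1], [3]]

def Spec_mapped_broadcast_shapes (shapes : List (List Int)) (out : List Int) : Prop := out = mapped_broadcast_shapes_alt shapes
instance (shapes : List (List Int)) (out : List Int) : Decidable (Spec_mapped_broadcast_shapes shapes out) := by unfold Spec_mapped_broadcast_shapes; infer_instance

-- ===== CLAIM (what is proved, stated in full; the proofs are below) =====
def Claim_equal_mapped_broadcast_shapes : Prop := ∀ (shapes : List (List Int)), Dom_mapped_broadcast_shapes shapes → Pre_mapped_broadcast_shapes shapes → Spec_mapped_broadcast_shapes shapes (mapped_broadcast_shapes shapes)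

-- ===== LEMMAS AND PROOFS =====

def pvPad (n : Nat) (s : List Int) : List Int := List.replicate (n - s.length) 1 ++ s

def pvStep (k : Nat) (e : Int) (p : List Int) : Int :=
  if p.getD k 0 > e then p.getD k 0 else e

def pvColA (n : Nat) (shapes : List (List Int)) (k : Nat) : Int :=
  shapes.foldl (fun e s => pvStep k e (pvPad n s)) 1

def pvBStep (out shape : List Int) : List Int :=
  (shape.reverse.zipIdx 1).foldl (fun out vj =>
    let a := PySem.List.pyGetD out (-(vj.2 : Int)) 0
    if vj.1 > a then PySem.List.pySetD out (-(vj.2 : Int)) vj.1 else out) out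

theorem pvPad_getD_lt {n : Nat} {s : List Int} {k : Nat} (hs : s.length ≤ n)
    (hk : k < n - s.length) : (pvPad n s).getD k 0 = 1 := by
  simp [pvPad, List.getD, List.getElem?_append_left (by simpa using hk : k < (List.replicate (n - s.length) (1:Int)).length), List.getElem?_replicate, hk]

theorem pvPad_getD_ge {n : Nat} {s : List Int} {k : Nat} (hs : s.length ≤ n)
    (h1 : n - s.length ≤ k) (h2 : k < n) :
    (pvPad n s).getD k 0 = s.getD (k - (n - s.length)) 0 := by
  have : k = (List.replicate (n - s.length) (1:Int)).length + (k - (n - s.length)) := by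
    simp; omega
  rw [pvPad, List.getD, this, List.getElem?_append_right (by simp)]
  simp [List.getD]

theorem pySetD_neg (xs : List Int) (k : Nat) (v : Int) (h0 : 0 < k) (h1 : k ≤ xs.length) :
    PySem.List.pySetD xs (-(k : Int)) v = xs.set (xs.length - k) v := by
  have hne : ¬ k = 0 := by omega
  simp [PySem.List.pySetD, PySem.List.pySet?, PySem.List.pyIdx?, hne, h1]

theorem innerA' (ps : List (List Int)) (e : List Int) (k : Nat) (hk : k < e.length) :
    ps.foldl (fun e p => if p.getD k 0 > e.getD k 0 then e.set k (p.getD k 0) else e) e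
    = e.set k (ps.foldl (fun a p => pvStep k a p) (e.getD k 0)) := by
  induction ps generalizing e with
  | nil =>
    simp only [List.foldl_nil, List.getD]
    rw [List.getElem?_eq_getElem hk]
    exact (List.set_getElem_self hk).symm
  | cons p t ih =>
    simp only [List.foldl_cons]
    by_cases h : p.getD k 0 > e.getD k 0
    · rw [if_pos h, ih _ (by simpa using hk), List.set_set]
      congr 1
      · have : (e.set k (p.getD k 0)).getD k 0 = p.getD k 0 := by
          simp [List.getD, List.getElem?_set_self, hk]
        rw [this]
        congr 1
        simp only [pvStep, if_pos h]
    · rw [if_neg h, ih _ hk]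
      congr 2
      simp only [pvStep, if_neg h]

theorem innerA (ps : List (List Int)) (e : List Int) (k : Nat) (hk : k < e.length) :
    ps.foldl (fun e p =>
      if PySem.List.pyGetD p (k : Int) 0 > PySem.List.pyGetD e (k : Int) 0 then
        PySem.List.pySetD e (k : Int) (PySem.List.pyGetD p (k : Int) 0)
      else e) e
    = e.set k (ps.foldl (fun a p => pvStep k a p) (e.getD k 0)) := by
  have hfun : (fun (e p : List Int) =>
      if PySem.List.pyGetD p (k : Int) 0 > PySem.List.pyGetD e (k : Int) 0 then
        PySem.List.pySetD e (k : Int) (PySem.List.pyGetD p (k : Int) 0)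
      else e) = (fun e p => if p.getD k 0 > e.getD k 0 then e.set k (p.getD k 0) else e) := by
    funext e p
    simp
  rw [hfun]
  exact innerA' ps e k hk

theorem outerA (ps : List (List Int)) (n : Nat) (m : Nat) (hm : m ≤ n) :
    (List.range m).foldl (fun e k =>
        e.set k (ps.foldl (fun a p => pvStep k a p) (e.getD k 0)))
      (List.replicate n (1 : Int))
    = (List.range n).map (fun i => if i < m then ps.foldl (fun a p => pvStep i a p) 1 else 1) := by
  induction m with
  | zero =>
    simp only [List.range_zero, List.foldl_nil]
    apply List.ext_getElem (by simp)
    intro i h1 h2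
    simp
  | succ m ih =>
    rw [List.range_succ, List.foldl_append, ih (by omega), List.foldl_cons, List.foldl_nil]
    have hgd : (List.map (fun i => if i < m then ps.foldl (fun a p => pvStep i a p) 1 else 1) (List.range n)).getD m 0 = 1 := by
      simp [List.getD, Nat.lt_of_succ_le hm]
    rw [hgd]
    apply List.ext_getElem (by simp)
    intro i h1 h2
    rw [List.getElem_set]
    simp only [List.getElem_map, List.getElem_range] at *
    by_cases hi : m = i
    · subst hi
      simp
    · rw [if_neg hi]
      by_cases hlt : i < m
      · simp [hlt, Nat.lt_succ_of_lt hlt]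
      · have : ¬ i < m + 1 := by omega
        simp [hlt, this]

theorem portA_eq (shapes : List (List Int)) (n : Nat)
    (hmax : (PySem.List.max? (shapes.map (fun s => (s.length : Int))) (fun x => x)).getD 0 = (n : Int))
    (hle : ∀ s ∈ shapes, s.length ≤ n) :
    mapped_broadcast_shapes shapes = (List.range n).map (pvColA n shapes) := by
  have hpad : shapes.map (fun shape =>
      List.replicate (max 0 ((n : Int) - (shape.length : Int))).toNat (1:Int) ++ shape)
      = shapes.map (pvPad n) := by
    apply List.map_congr_left
    intro s hs
    have hsn := hle s hs
    have h1 : (max 0 ((n:Int) - (s.length:Int))).toNat = n - s.length := by omega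
    rw [pvPad, h1]
  simp only [mapped_broadcast_shapes, hmax, Int.toNat_natCast, hpad,
    PySem.List.pyRange_one, Int.sub_zero]
  rw [List.foldl_map]
  have hF : ∀ (e : List Int) (k : Nat),
      (fun (expanded : List Int) (i : Int) =>
        (shapes.map (pvPad n)).foldl (fun e padded =>
          if PySem.List.pyGetD padded i 0 > PySem.List.pyGetD e i 0 then
            PySem.List.pySetD e i (PySem.List.pyGetD padded i 0)
          else e) expanded) e (0 + (k : Int))
      = (shapes.map (pvPad n)).foldl (fun e padded =>
          if PySem.List.pyGetD padded (k : Int) 0 > PySem.List.pyGetD e (k : Int) 0 then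
            PySem.List.pySetD e (k : Int) (PySem.List.pyGetD padded (k : Int) 0)
          else e) e := by
    intro e k
    simp
  have key : ∀ m, m ≤ n →
      (List.range m).foldl (fun (e : List Int) (k : Nat) =>
        (shapes.map (pvPad n)).foldl (fun e padded =>
          if PySem.List.pyGetD padded (k : Int) 0 > PySem.List.pyGetD e (k : Int) 0 then
            PySem.List.pySetD e (k : Int) (PySem.List.pyGetD padded (k : Int) 0)
          else e) e) (List.replicate n 1)
      = (List.range m).foldl (fun (e : List Int) (k : Nat) =>
          e.set k ((shapes.map (pvPad n)).foldl (fun a p => pvStep k a p) (e.getD k 0)))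
        (List.replicate n 1) := by
    intro m hm
    induction m with
    | zero => rfl
    | succ m ihm =>
      rw [List.range_succ, List.foldl_append, List.foldl_append, ihm (by omega),
        List.foldl_cons, List.foldl_nil, List.foldl_cons, List.foldl_nil]
      rw [outerA _ _ _ (by omega)]
      apply innerA
      simp
      omega
  simp only [zero_add]
  rw [key n le_rfl, outerA _ _ _ le_rfl]
  apply List.map_congr_left
  intro i hi
  rw [List.mem_range] at hi
  simp only [hi, if_pos, pvColA, List.foldl_map]

theorem getD_set_lt (xs : List Int) (i k : Nat) (v : Int) (hi : i < xs.length) :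
    (xs.set i v).getD k 0 = if k = i then v else xs.getD k 0 := by
  by_cases hk : k < xs.length
  · rw [List.getD, List.getElem?_eq_getElem (by simpa using hk), List.getElem_set]
    by_cases h : i = k
    · simp [h]
    · rw [if_neg h, if_neg (by omega), List.getD, List.getElem?_eq_getElem hk]
  · rw [if_neg (by omega), List.getD, List.getD,
      List.getElem?_eq_none (Nat.le_of_not_lt hk),
      List.getElem?_eq_none (by rw [List.length_set]; omega)]

theorem innerB (vs : List Int) (j0 : Nat) (out : List Int) (h0 : 1 ≤ j0)
    (hlen : j0 + vs.length ≤ out.length + 1) :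
    ((vs.zipIdx j0).foldl (fun out vj =>
      let a := PySem.List.pyGetD out (-(vj.2 : Int)) 0
      if vj.1 > a then PySem.List.pySetD out (-(vj.2 : Int)) vj.1 else out) out).length = out.length ∧
    ∀ k, k < out.length →
      ((vs.zipIdx j0).foldl (fun out vj =>
        let a := PySem.List.pyGetD out (-(vj.2 : Int)) 0
        if vj.1 > a then PySem.List.pySetD out (-(vj.2 : Int)) vj.1 else out) out).getD k 0 =
      if out.length + 1 ≤ k + j0 + vs.length ∧ k + j0 ≤ out.length then
          (if vs.getD (out.length - j0 - k) 0 > out.getD k 0 then vs.getD (out.length - j0 - k) 0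
           else out.getD k 0)
        else out.getD k 0 := by
  induction vs generalizing j0 out with
  | nil =>
    refine ⟨rfl, ?_⟩
    intro k hk
    simp only [List.zipIdx_nil, List.foldl_nil, List.length_nil]
    rw [if_neg (by omega)]
  | cons v rest ih =>
    have hj0le : j0 ≤ out.length := by
      simp only [List.length_cons] at hlen
      omega
    have hget : PySem.List.pyGetD out (-(j0 : Int)) 0 = out.getD (out.length - j0) 0 := by
      rw [PySem.List.pyGetD_neg_natCast out j0 0 (by omega) hj0le]
      rw [List.getD, List.getElem?_eq_getElem (by omega)]
      rfl
    have hset : PySem.List.pySetD out (-(j0 : Int)) v = out.set (out.length - j0) v :=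
      pySetD_neg out j0 v (by omega) hj0le
    simp only [List.zipIdx_cons, List.foldl_cons, hget, hset]
    set out1 : List Int := (if v > out.getD (out.length - j0) 0 then out.set (out.length - j0) v else out) with hout1def
    have hlen1 : out1.length = out.length := by
      rw [hout1def]; split <;> simp
    have hout1 : ∀ k, k < out.length → out1.getD k 0 =
        if k + j0 = out.length then (if v > out.getD k 0 then v else out.getD k 0)
        else out.getD k 0 := by
      intro k hk
      rw [hout1def]
      by_cases hk2 : k + j0 = out.length
      · have hkk : k = out.length - j0 := by omega
        subst hkk
        rw [if_pos hk2]
        split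
        · rw [getD_set_lt _ _ _ _ (by omega), if_pos rfl]
        · rfl
      · rw [if_neg hk2]
        split
        · rw [getD_set_lt _ _ _ _ (by omega), if_neg (by omega)]
        · rfl
    obtain ⟨ihlen, ihget⟩ := ih (j0 + 1) out1 (by omega)
      (by rw [hlen1]; simp only [List.length_cons] at hlen; omega)
    refine ⟨by rw [ihlen, hlen1], ?_⟩
    intro k hk
    rw [ihget k (by omega), hlen1, hout1 k hk]
    simp only [List.length_cons]
    by_cases hA : k + j0 = out.length
    · rw [if_neg (show ¬(out.length + 1 ≤ k + (j0 + 1) + rest.length ∧ k + (j0 + 1) ≤ out.length) from by omega),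
        if_pos hA,
        show out.length - j0 - k = 0 from by omega, List.getD_cons_zero,
        if_pos (show out.length + 1 ≤ k + j0 + (rest.length + 1) ∧ k + j0 ≤ out.length from by omega)]
    · rw [if_neg hA]
      by_cases hB : out.length + 1 ≤ k + (j0 + 1) + rest.length ∧ k + (j0 + 1) ≤ out.length
      · rw [if_pos hB,
          show out.length - j0 - k = (out.length - (j0 + 1) - k) + 1 from by omega,
          List.getD_cons_succ,
          if_pos (show out.length + 1 ≤ k + j0 + (rest.length + 1) ∧ k + j0 ≤ out.length from by omega)]
      · rw [if_neg hB,
          if_neg (show ¬(out.length + 1 ≤ k + j0 + (rest.length + 1) ∧ k + j0 ≤ out.length) from by omega)]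

theorem pvBStep_char (out s : List Int) (n : Nat) (hout : out.length = n) (hs : s.length ≤ n) :
    (pvBStep out s).length = n ∧ ∀ k, k < n →
      (pvBStep out s).getD k 0 =
        if k < n - s.length then out.getD k 0 else pvStep k (out.getD k 0) (pvPad n s) := by
  obtain ⟨hl, hg⟩ := innerB s.reverse 1 out (le_refl 1) (by simp; omega)
  rw [pvBStep]
  refine ⟨by rw [hl, hout], ?_⟩
  intro k hk
  rw [hg k (by omega)]
  simp only [List.length_reverse, hout]
  by_cases hc : k < n - s.length
  · rw [if_neg (show ¬(n + 1 ≤ k + 1 + s.length ∧ k + 1 ≤ n) from by omega), if_pos hc]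
  · have hrev : s.reverse.getD (n - 1 - k) 0 = s.getD (k - (n - s.length)) 0 := by
      have ht : n - 1 - k < s.length := by omega
      rw [List.getD, List.getD, List.getElem?_reverse (by simpa using ht),
        show s.length - 1 - (n - 1 - k) = k - (n - s.length) from by omega]
    rw [if_pos (show n + 1 ≤ k + 1 + s.length ∧ k + 1 ≤ n from by omega), if_neg hc, hrev,
      pvStep, pvPad_getD_ge hs (by omega) hk]

theorem foldB_char (shapes : List (List Int)) (init : List Int) (n : Nat)
    (hinit : init.length = n) (hle : ∀ s ∈ shapes, s.length ≤ n) :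
    (shapes.foldl pvBStep init).length = n ∧ ∀ k, k < n →
      (shapes.foldl pvBStep init).getD k 0 =
        shapes.foldl (fun e s => if k < n - s.length then e else pvStep k e (pvPad n s))
          (init.getD k 0) := by
  induction shapes generalizing init with
  | nil => exact ⟨hinit, fun k hk => rfl⟩
  | cons s t ih =>
    obtain ⟨h1, h2⟩ := pvBStep_char init s n hinit (hle s (by simp))
    obtain ⟨h3, h4⟩ := ih (pvBStep init s) h1 (fun u hu => hle u (by simp [hu]))
    refine ⟨h3, ?_⟩
    intro k hk
    rw [List.foldl_cons, h4 k hk, List.foldl_cons, h2 k hk]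

theorem pvStep_ge_one {k : Nat} {e : Int} {p : List Int} (he : 1 ≤ e) : 1 ≤ pvStep k e p := by
  rw [pvStep]; split <;> omega

theorem col_eq (shapes : List (List Int)) (n k : Nat) (e : Int) (he : 1 ≤ e)
    (hle : ∀ s ∈ shapes, s.length ≤ n) :
    shapes.foldl (fun e s => pvStep k e (pvPad n s)) e =
    shapes.foldl (fun e s => if k < n - s.length then e else pvStep k e (pvPad n s)) e := by
  induction shapes generalizing e with
  | nil => rfl
  | cons s t ih =>
    rw [List.foldl_cons, List.foldl_cons]
    by_cases hc : k < n - s.length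
    · rw [if_pos hc]
      have hp : pvStep k e (pvPad n s) = e := by
        rw [pvStep, pvPad_getD_lt (hle s (by simp)) hc, if_neg (by omega)]
      rw [hp]
      exact ih e he (fun u hu => hle u (by simp [hu]))
    · rw [if_neg hc]
      exact ih _ (pvStep_ge_one he) (fun u hu => hle u (by simp [hu]))

theorem main_eq (shapes : List (List Int)) :
    mapped_broadcast_shapes shapes = mapped_broadcast_shapes_alt shapes := by
  cases shapes with
  | nil => rfl
  | cons s t =>
    have hsome : PySem.List.max? ((s :: t).map (fun s => (s.length : Int))) (fun x => x)
        = some (List.foldl max ((s.length : Int)) (t.map (fun s => (s.length : Int)))) := by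
      rw [List.map_cons]
      exact PySem.List.max?_id_cons _ _
    have hM0 : (0 : Int) ≤ List.foldl max ((s.length : Int)) (t.map (fun s => (s.length : Int))) := by
      have h1 := (PySem.List.le_foldl_max (t.map (fun s => (s.length : Int))) ((s.length : Int))).1
      omega
    set n : Nat := (List.foldl max ((s.length : Int)) (t.map (fun s => (s.length : Int)))).toNat with hndef
    have hgd : (PySem.List.max? ((s :: t).map (fun s => (s.length : Int))) (fun x => x)).getD 0
        = (n : Int) := by
      rw [hsome, Option.getD_some, hndef]
      omega
    have hle : ∀ u ∈ s :: t, u.length ≤ n := by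
      intro u hu
      have h1 := PySem.List.max?_isMax hsome ((u.length : Int))
        (List.mem_map_of_mem hu)
      omega
    have hB : mapped_broadcast_shapes_alt (s :: t) = (s :: t).foldl pvBStep (List.replicate n 1) := by
      simp only [mapped_broadcast_shapes_alt, hgd, Int.toNat_natCast]
      rfl
    rw [portA_eq _ n hgd hle, hB]
    obtain ⟨hBl, hBg⟩ := foldB_char (s :: t) (List.replicate n 1) n (by simp) hle
    apply List.ext_getElem (by rw [List.length_map, List.length_range, hBl])
    intro i h1 h2
    have hi : i < n := by simpa using h1
    have hgetD : ((s :: t).foldl pvBStep (List.replicate n 1)).getD i 0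
        = ((s :: t).foldl pvBStep (List.replicate n 1))[i] := by
      rw [List.getD, List.getElem?_eq_getElem h2]
      rfl
    rw [List.getElem_map, ← hgetD, hBg i hi, List.getElem_range]
    have hinit1 : (List.replicate n (1 : Int)).getD i 0 = 1 := by
      simp [List.getD, hi]
    rw [hinit1, pvColA, col_eq (s :: t) n i 1 le_rfl hle]

-- ===== VERDICT (by name: the statement is the Claim_ definition above) =====
theorem mapped_broadcast_shapes_spec : Claim_equal_mapped_broadcast_shapes := by
  intro shapes _ _
  unfold Spec_mapped_broadcast_shapes
  exact main_eq shapes
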